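-- pv_equiv track=rewrite | github.com/kalraid/mafia-game-web | backend/game/vote.py | tally_votes
-- ===== SOURCE A (Python) =====
-- from collections import Counter
-- from typing import Dict, Optional, Tuple
--
-- def tally_votes(votes: Dict[str, str]) -> Tuple[Optional[str], bool]:
--     """
--     투표 집계.
--
--     :param votes: voter_id -> target_player_id
--     :return: (선정된 player_id 또는 None, 동률 여부)
--     """
--     if not votes:
--         return None, False
--
--     counter = Counter(votes.values())
--     most_common = counter.most_common()
--
--     if len(most_common) == 0:
--         return None, False
--     if len(most_common) == 1:
--         return most_common[0][0], False
--
--     top_count = most_common[0][1]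
--     tied = [player for player, count in most_common if count == top_count]
--     if len(tied) > 1:
--         return None, True
--
--     return most_common[0][0], False
-- ===== SOURCE B (Python) =====
-- def tally_votes(votes):
--     """Single-pass tally: running best target, best count, and tie counter; no sorting."""
--     counts = {}
--     for target in votes.values():
--         counts[target] = counts.get(target, 0) + 1
--     best = None
--     best_count = 0
--     ties = 0
--     for target, count in counts.items():
--         if count > best_count:
--             best, best_count, ties = target, count, 1
--         elif count == best_count:
--             ties += 1
--     if best is None:
--         return None, False
--     if ties > 1:
--         return None, True
--     return best, False
-- ===== Notes on version B (the rewrite author's own statement) =====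
-- stated objective: simpler
-- what changed: B drops Counter.most_common()'s sort entirely: one linear scan over the count items keeps the running best target, best count, and a counter of targets tied at that count, deciding winner and tie flag directly.
import Mathlib
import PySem

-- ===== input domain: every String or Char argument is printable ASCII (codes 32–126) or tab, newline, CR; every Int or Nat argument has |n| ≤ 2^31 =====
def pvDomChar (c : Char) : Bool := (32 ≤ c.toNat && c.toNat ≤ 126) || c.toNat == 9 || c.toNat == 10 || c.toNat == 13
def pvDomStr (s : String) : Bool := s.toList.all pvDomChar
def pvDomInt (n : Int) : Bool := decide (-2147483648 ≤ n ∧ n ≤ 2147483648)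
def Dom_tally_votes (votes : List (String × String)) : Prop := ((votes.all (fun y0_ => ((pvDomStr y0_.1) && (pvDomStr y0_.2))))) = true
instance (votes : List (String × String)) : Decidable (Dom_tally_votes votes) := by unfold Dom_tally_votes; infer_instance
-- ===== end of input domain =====

-- B replaces Counter.most_common()'s sort by a single linear scan of the counts
-- (running best target, best count, tie counter); same return value everywhere.

-- ===== PORT A =====
def tally_votes (votes : List (String × String)) : Option String × Bool :=
  if votes = [] then (none, false)
  else
    let counter := PySem.Dict.counter (PySem.Dict.ofList votes).values
    let most_common := PySem.List.sorted counter.items (fun p => p.2) true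
    match most_common with
    | [] => (none, false)
    | [(p, _)] => (some p, false)
    | (p, top_count) :: _ =>
        let tied := (most_common.filter (fun q => q.2 == top_count)).map (·.1)
        if tied.length > 1 then (none, true) else (some p, false)

-- ===== PORT B =====
-- B-side helper: the body of B's single scan over the count items
def pvStep (acc : Option String × Int × Int) (p : String × Int) : Option String × Int × Int :=
  if p.2 > acc.2.1 then (some p.1, p.2, 1)
  else if p.2 = acc.2.1 then (acc.1, acc.2.1, acc.2.2 + 1)
  else acc

def tally_votes_alt (votes : List (String × String)) : Option String × Bool :=
  let counts := (PySem.Dict.ofList votes).values.foldl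
      (fun d x => d.insert x (d.getD x 0 + 1)) PySem.Dict.empty
  let st := counts.items.foldl pvStep (none, 0, 0)
  match st.1 with
  | none => (none, false)
  | some best => if st.2.2 > 1 then (none, true) else (some best, false)

-- ===== PRECONDITION & SPEC =====
def Spec_tally_votes (votes : List (String × String)) (out : Option String × Bool) : Prop := out = tally_votes_alt votes
instance (votes : List (String × String)) (out : Option String × Bool) : Decidable (Spec_tally_votes votes out) := by unfold Spec_tally_votes; infer_instance

-- ===== CLAIM (what is proved, stated in full; the proofs are below) =====
def Claim_equal_tally_votes : Prop := ∀ (votes : List (String × String)), Dom_tally_votes votes → Spec_tally_votes votes (tally_votes votes)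

-- ===== LEMMAS AND PROOFS =====

-- running maximum of the counts
def pvMx (L : List (String × Int)) : Int := L.foldl (fun m p => max m p.2) 0

lemma pvMx_append (L : List (String × Int)) (p : String × Int) :
    pvMx (L ++ [p]) = max (pvMx L) p.2 := by
  simp [pvMx, List.foldl_append]

lemma pvLe_mx (L : List (String × Int)) (q : String × Int) (hq : q ∈ L) : q.2 ≤ pvMx L := by
  induction L using List.reverseRecOn with
  | nil => cases hq
  | append_singleton t p ih =>
      rw [pvMx_append]
      rcases List.mem_append.mp hq with h | h
      · exact le_trans (ih h) (le_max_left _ _)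
      · simp at h; subst h; exact le_max_right _ _

lemma pvMx_attained (L : List (String × Int)) (hpos : ∀ p ∈ L, (1:Int) ≤ p.2)
    (hne : L ≠ []) : ∃ q ∈ L, q.2 = pvMx L := by
  induction L using List.reverseRecOn with
  | nil => exact absurd rfl hne
  | append_singleton t p ih =>
      rw [pvMx_append]
      rcases eq_or_ne t [] with rfl | htne
      · refine ⟨p, by simp, ?_⟩
        have := hpos p (by simp)
        simp [pvMx]; omega
      · obtain ⟨q, hq, hqe⟩ := ih (fun r hr => hpos r (by simp [hr])) htne
        rcases le_or_gt p.2 (pvMx t) with h | h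
        · exact ⟨q, by simp [hq], by rw [hqe]; omega⟩
        · exact ⟨p, by simp, by omega⟩

lemma pvLoop_char (L : List (String × Int)) (hpos : ∀ p ∈ L, (1:Int) ≤ p.2) (hne : L ≠ []) :
    L.foldl pvStep (none, 0, 0) =
      ((L.find? (fun p => p.2 == pvMx L)).map (·.1), pvMx L,
        ((L.countP (fun p => p.2 == pvMx L) : Nat) : Int)) := by
  induction L using List.reverseRecOn with
  | nil => exact absurd rfl hne
  | append_singleton t p ih =>
      rcases eq_or_ne t [] with rfl | htne
      · have h1 : (1:Int) ≤ p.2 := hpos p (by simp)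
        have hm : pvMx [p] = p.2 := by simp [pvMx]; omega
        simp [pvStep, hm]
        omega
      · have hpos' : ∀ r ∈ t, (1:Int) ≤ r.2 := fun r hr => hpos r (by simp [hr])
        have ih' := ih hpos' htne
        have hmx := pvMx_append t p
        rw [List.foldl_append, ih']
        rcases lt_trichotomy (pvMx t) p.2 with h | h | h
        · -- new strict maximum
          have hmax : pvMx (t ++ [p]) = p.2 := by rw [hmx]; omega
          have hnone : t.find? (fun q => q.2 == p.2) = none := by
            apply List.find?_eq_none.mpr
            intro q hq
            have := pvLe_mx t q hq
            simp; omega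
          have hzero : t.countP (fun q => q.2 == p.2) = 0 := by
            apply List.countP_eq_zero.mpr
            intro q hq
            have := pvLe_mx t q hq
            simp; omega
          simp [pvStep, h, List.find?_append, List.countP_append, hnone, hzero, hmax]
        · -- equal to the maximum so far
          have hmax : pvMx (t ++ [p]) = pvMx t := by rw [hmx]; omega
          obtain ⟨q, hq, hqe⟩ := pvMx_attained t hpos' htne
          have hsome : (t.find? (fun r => r.2 == pvMx t)).isSome := by
            rw [List.find?_isSome]
            exact ⟨q, hq, by simp [hqe]⟩
          obtain ⟨f, hf⟩ := Option.isSome_iff_exists.mp hsome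
          have h' : p.2 = pvMx t := h.symm
          simp [pvStep, h', hf, hmax, List.find?_append, List.countP_append]
        · -- below the maximum
          have hmax : pvMx (t ++ [p]) = pvMx t := by rw [hmx]; omega
          have hnlt : ¬ p.2 > (pvMx t) := by omega
          have hne3 : ¬ p.2 = pvMx t := by omega
          have hne2 : (p.2 == pvMx t) = false := by simp; omega
          simp [pvStep, hnlt, hne3, hmax, List.find?_append, List.countP_append, hne2]

lemma pvUnique {L : List (String × Int)} {pred : String × Int → Bool}
    (h : L.countP pred = 1) {a b : String × Int}
    (ha : a ∈ L) (hpa : pred a = true) (hb : b ∈ L) (hpb : pred b = true) : a = b := by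
  by_contra hab
  obtain ⟨l1, l2, rfl⟩ := List.append_of_mem ha
  have hb' : b ∈ l1 ∨ b ∈ l2 := by
    rcases List.mem_append.mp hb with h1 | h1
    · exact Or.inl h1
    · rcases List.mem_cons.mp h1 with h2 | h2
      · exact absurd h2.symm hab
      · exact Or.inr h2
  have hcount : l1.countP pred + (l2.countP pred + 1) = 1 := by
    simpa [List.countP_append, List.countP_cons, hpa] using h
  rcases hb' with h1 | h1
  · have := List.countP_pos_iff.mpr ⟨b, h1, hpb⟩
    omega
  · have := List.countP_pos_iff.mpr ⟨b, h1, hpb⟩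
    omega

lemma pvItems_foldl_ne_nil (rest : List (String × String)) (d : PySem.Dict String String)
    (hd : d.items ≠ []) :
    (rest.foldl (fun acc p => acc.insert p.1 p.2) d).items ≠ [] := by
  induction rest generalizing d with
  | nil => exact hd
  | cons q t ih =>
      apply ih
      rw [PySem.Dict.items_insert]
      split
      · simpa using hd
      · simp

lemma pvOfList_items_ne_nil (v : String × String) (rest : List (String × String)) :
    (PySem.Dict.ofList (v :: rest)).items ≠ [] := by
  show (List.foldl (fun acc p => acc.insert p.1 p.2) PySem.Dict.empty (v :: rest)).items ≠ []
  rw [List.foldl_cons]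
  apply pvItems_foldl_ne_nil
  rw [PySem.Dict.items_insert, PySem.Dict.contains_empty]
  simp

-- head of the reverse-sorted item list: it is a member, carries the maximal count,
-- and the tie count transfers to the unsorted list
lemma pvA_char (L : List (String × Int)) {m : String × Int} {t : List (String × Int)}
    (hmc : PySem.List.sorted L (fun p => p.2) true = m :: t)
    (hpos : ∀ p ∈ L, (1:Int) ≤ p.2) :
    m ∈ L ∧ m.2 = pvMx L ∧
      (m :: t).countP (fun q => q.2 == m.2) = L.countP (fun q => q.2 == pvMx L) := by
  have hperm : (m :: t).Perm L := hmc ▸ PySem.List.sorted_perm L (fun p => p.2) true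
  have hm : m ∈ L := hperm.mem_iff.mp (by simp)
  have hne : L ≠ [] := by rintro rfl; exact absurd hperm.symm (by simp)
  obtain ⟨q, hq, hqe⟩ := pvMx_attained L hpos hne
  have hge : q.2 ≤ m.2 := PySem.List.key_head_sorted_rev_ge L (fun p => p.2) hmc q hq
  have hmx : m.2 = pvMx L := le_antisymm (pvLe_mx L m hm) (hqe ▸ hge)
  exact ⟨hm, hmx, hmx ▸ hperm.countP_eq _⟩

-- ===== VERDICT (by name: the statement is the Claim_ definition above) =====
theorem tally_votes_spec : Claim_equal_tally_votes := by
  intro votes _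
  unfold Spec_tally_votes tally_votes tally_votes_alt
  rcases eq_or_ne votes [] with rfl | hv
  · rfl
  · simp only [if_neg hv]
    rw [PySem.Dict.foldl_insert_getD_add_one_eq_counter]
    set vals := (PySem.Dict.ofList votes).values with hvals
    set L := (PySem.Dict.counter vals).items with hLdef
    -- counts in L are positive
    have hpos : ∀ p ∈ L, (1:Int) ≤ p.2 := by
      intro p hp
      rw [hLdef, PySem.Dict.items_counter] at hp
      obtain ⟨k, hk, rfl⟩ := List.mem_map.mp hp
      have : k ∈ vals := (PySem.Set.mem_ofList vals k).mp hk
      have := List.count_pos_iff.mpr this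
      simp; omega
    -- L is nonempty
    have hLne : L ≠ [] := by
      obtain ⟨v, rest, rfl⟩ := List.exists_cons_of_ne_nil hv
      have hitems : (PySem.Dict.ofList (v :: rest)).items ≠ [] :=
        pvOfList_items_ne_nil v rest
      have hvne : vals ≠ [] := by
        rw [hvals]
        show (PySem.Dict.ofList (v :: rest)).items.map (·.2) ≠ []
        simpa using hitems
      obtain ⟨w, ws, hw⟩ := List.exists_cons_of_ne_nil hvne
      intro hLnil
      have hkeys : (PySem.Dict.counter vals).keys = PySem.Set.ofList vals :=
        PySem.Dict.keys_counter vals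
      have : PySem.Set.ofList vals = [] := by
        rw [← hkeys]
        show (PySem.Dict.counter vals).items.map (·.1) = []
        rw [← hLdef, hLnil]; rfl
      have := (PySem.Set.mem_ofList vals w).mpr (by simp [hw])
      simp [‹PySem.Set.ofList vals = []›] at this
    -- analyse the sorted list
    obtain ⟨m, t, hmc⟩ : ∃ m t, PySem.List.sorted L (fun p => p.2) true = m :: t := by
      rcases h : PySem.List.sorted L (fun p => p.2) true with _ | ⟨m, t⟩
      · exact absurd ((PySem.List.sorted_eq_nil_iff L _ true).mp h) hLne
      · exact ⟨m, t, rfl⟩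
    obtain ⟨hmL, hmx, hcnt⟩ := pvA_char L hmc hpos
    rw [pvLoop_char L hpos hLne]
    obtain ⟨q, hq, hqe⟩ := pvMx_attained L hpos hLne
    have hfs : (List.find? (fun p => p.2 == pvMx L) L).isSome :=
      List.find?_isSome.mpr ⟨q, hq, by simp [hqe]⟩
    obtain ⟨f, hf⟩ := Option.isSome_iff_exists.mp hfs
    have hfL : f ∈ L := List.mem_of_find?_eq_some hf
    have hfmx : f.2 = pvMx L := by
      have h0 := List.find?_some hf
      simpa using h0
    rw [hmc, hf]
    obtain ⟨ms, mc⟩ := m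
    have hmx' : mc = pvMx L := hmx
    rcases t with _ | ⟨r, t'⟩
    · -- singleton sorted list: L is exactly [(ms, mc)]
      have hperm : L.Perm [(ms, mc)] :=
        (hmc ▸ PySem.List.sorted_perm L (fun p => p.2) true).symm
      have hLm : L = [(ms, mc)] := List.perm_singleton.mp hperm
      have hfm : f = (ms, mc) := by rw [hLm] at hfL; simpa using hfL
      have h1 : (1:Int) ≤ mc := hpos _ hmL
      have hC : L.countP (fun p => p.2 == pvMx L) = 1 := by
        rw [hLm]
        have : mc = pvMx [(ms, mc)] := by simp [pvMx]; omega
        simp [← this]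
      rw [hfm, hC]
      norm_num
    · -- two or more entries in the sorted list
      have hlen : ((((ms, mc) :: r :: t').filter (fun q => q.2 == mc)).map
          (fun p => p.1)).length = L.countP (fun p => p.2 == pvMx L) := by
        rw [List.length_map, ← List.countP_eq_length_filter]
        exact hcnt
      have hC1 : 1 ≤ L.countP (fun p => p.2 == pvMx L) :=
        List.countP_pos_iff.mpr ⟨(ms, mc), hmL, by simp [hmx']⟩
      rcases lt_or_ge 1 (L.countP (fun p => p.2 == pvMx L)) with hC | hC
      · -- tie at the top: both sides return (none, true)
        have hA : (((((ms, mc) :: r :: t').filter (fun q => q.2 == mc)).map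
            (fun p => p.1)).length > 1) := by omega
        have hB : ((L.countP (fun p => p.2 == pvMx L) : Nat) : Int) > 1 := by
          exact_mod_cast hC
        simp only [Option.map_some]
        rw [if_pos hA, if_pos hB]
      · -- unique maximum: both sides return its key
        have hCe : L.countP (fun p => p.2 == pvMx L) = 1 := by omega
        have hfm : (ms, mc) = f :=
          pvUnique hCe hmL (by simp [hmx']) hfL (by simp [hfmx])
        have hA : ¬ (((((ms, mc) :: r :: t').filter (fun q => q.2 == mc)).map
            (fun p => p.1)).length > 1) := by omega
        have hB : ¬ (((L.countP (fun p => p.2 == pvMx L) : Nat) : Int) > 1) := by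
          rw [hCe]; norm_num
        simp only [Option.map_some]
        rw [if_neg hA, if_neg hB, ← hfm]
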